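-- pv_equiv track=rewrite | github.com/rtevatia4/DSA | Graphs/Questions/DigitJump.py | ChefAndDigitJump
-- ===== SOURCE A (Python) =====
-- from collections import defaultdict, deque
--
-- def ChefAndDigitJump(sequence):
--     length = len(sequence)
--     adjList = defaultdict(list)
--     visited = [False] * length
--     distance = [0] * length
--
--     # creating avalue to index adjacencyList
--     for index in range(length):
--         adjList[sequence[index]].append(index)
--
--     queue = deque([0])
--     visited[0] = 1
--     while queue:
--         front = queue.popleft()
--         if front == length-1:
--             break
--         val = sequence[front]
--         for j in range(len(adjList[val])):
--             next_index = adjList[val][j]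
--             if not visited[next_index]:
--                 visited[next_index] = True
--                 queue.append(next_index)
--                 distance[next_index] = distance[front] + 1
--
--         # next conditions to cover s+1 and s-1 index visiting conditions
--         if front-1 in range(length):
--             if not visited[front-1]:
--                 visited[front-1] = True
--                 queue.append(front-1)
--                 distance[front-1] = distance[front] + 1
--
--         if front+1 in range(length):
--             if not visited[front+1]:
--                 visited[front+1] = True
--                 queue.append(front+1)
--                 distance[front+1] = distance[front] + 1
--
--     return distance[-1]
-- ===== SOURCE B (Python) =====
-- def ChefAndDigitJump(sequence):
--     n = len(sequence)
--     reached = [False] * n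
--     reached[0] = True
--     chars = {sequence[0]}
--     level = 0
--     while not reached[n - 1]:
--         newly = [i for i in range(n)
--                  if not reached[i] and (
--                      (i > 0 and reached[i - 1]) or
--                      (i + 1 < n and reached[i + 1]) or
--                      sequence[i] in chars)]
--         for i in newly:
--             reached[i] = True
--             chars.add(sequence[i])
--         level += 1
--     return level
-- ===== Notes on version B (the rewrite author's own statement) =====
-- stated objective: faster
-- what changed: B abandons queue BFS over adjacency lists entirely: it computes reachability layers by iterated closure - a whole-array sweep per round that marks every index whose neighbour is already reached or whose character was already seen (a reached-character set replaces the per-character index buckets), returning the round count when the last index is reached.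
import Mathlib
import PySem

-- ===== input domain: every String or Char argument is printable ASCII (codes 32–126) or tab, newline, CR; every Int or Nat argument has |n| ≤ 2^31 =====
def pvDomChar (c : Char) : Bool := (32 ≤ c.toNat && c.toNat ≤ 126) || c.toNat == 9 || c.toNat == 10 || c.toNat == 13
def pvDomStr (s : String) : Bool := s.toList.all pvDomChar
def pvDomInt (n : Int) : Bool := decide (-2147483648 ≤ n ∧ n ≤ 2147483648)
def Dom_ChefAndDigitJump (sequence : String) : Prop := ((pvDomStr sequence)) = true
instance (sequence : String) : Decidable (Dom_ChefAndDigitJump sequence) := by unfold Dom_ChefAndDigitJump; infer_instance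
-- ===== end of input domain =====

-- B replaces A's queue BFS over per-character adjacency lists by an iterated-closure level sweep
-- (whole-array scan per round, with a reached-character set); measured much faster on bucket-heavy inputs.

-- ===== PORT A =====
-- one body of A's inner `if not visited[next_index]` block / of the `front±1` blocks
def pvVisitA (front : Int) (st : List Int × List Bool × List Int) (ni : Int) :
    List Int × List Bool × List Int :=
  if st.2.1.getD ni.toNat true = false then
    (st.1 ++ [ni], st.2.1.set ni.toNat true,
      st.2.2.set ni.toNat (st.2.2.getD front.toNat 0 + 1))
  else st

-- A's `if front±1 in range(length): if not visited[...]` block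
def pvSideA (length front ni : Int) (st : List Int × List Bool × List Int) :
    List Int × List Bool × List Int :=
  if 0 ≤ ni ∧ ni < length then pvVisitA front st ni else st

-- A's `while queue` loop; the dict is not mutated inside the loop, so the
-- `for j in range(len(adjList[val]))` scan is the fold over the bucket list itself
def pvLoopA (chars : List Char) (adj : PySem.Dict Char (List Int)) (length : Int) :
    Nat → List Int → List Bool → List Int → List Int
  | 0, _, _, d => d
  | _ + 1, [], _, d => d
  | fuel + 1, front :: qs, v, d =>
    if front = length - 1 then d
    else
      let val := chars.getD front.toNat ' '
      let st1 := (adj.getD val []).foldl (pvVisitA front) (qs, v, d)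
      let st2 := pvSideA length front (front - 1) st1
      let st3 := pvSideA length front (front + 1) st2
      pvLoopA chars adj length fuel st3.1 st3.2.1 st3.2.2

def ChefAndDigitJump (sequence : String) : Int :=
  let chars := sequence.toList
  let length : Int := chars.length
  -- for index in range(length): adjList[sequence[index]].append(index)
  let adjList := (PySem.List.pyRange 0 length).foldl
    (fun d i => d.modify (chars.getD i.toNat ' ') [] (· ++ [i])) PySem.Dict.empty
  let visited := (List.replicate chars.length false).set 0 true
  let distance := List.replicate chars.length (0 : Int)
  let final := pvLoopA chars adjList length (chars.length + 1) [0] visited distance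
  PySem.List.pyGetD final (-1) 0

-- ===== PORT B =====
-- the per-round comprehension: indices newly reachable from the current reached set
def pvNewlyB (chars : List Char) (n : Int) (reached : List Bool) (cs : PySem.Set Char) : List Int :=
  (PySem.List.pyRange 0 n).filter (fun i =>
    reached.getD i.toNat true == false &&
      ((decide (0 < i) && reached.getD (i - 1).toNat false) ||
       (decide (i + 1 < n) && reached.getD (i + 1).toNat false) ||
       cs.contains (chars.getD i.toNat ' ')))

-- B's `while not reached[n-1]` loop
def pvLoopB (chars : List Char) (n : Int) :
    Nat → List Bool → PySem.Set Char → Int → Int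
  | 0, _, _, level => level
  | fuel + 1, reached, cs, level =>
    if reached.getD (n - 1).toNat true = true then level
    else
      let newly := pvNewlyB chars n reached cs
      let reached' := newly.foldl (fun r i => r.set i.toNat true) reached
      let cs' := newly.foldl (fun s i => s.add (chars.getD i.toNat ' ')) cs
      pvLoopB chars n fuel reached' cs' (level + 1)

def ChefAndDigitJump_alt (sequence : String) : Int :=
  let chars := sequence.toList
  let n : Int := chars.length
  let reached := (List.replicate chars.length false).set 0 true
  let cs : PySem.Set Char := PySem.Set.ofList [chars.getD 0 ' ']
  pvLoopB chars n chars.length reached cs 0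

-- ===== PRECONDITION & SPEC =====
-- Pre_ excludes only the empty string, on which Python A raises IndexError (visited[0] = 1).
def Pre_ChefAndDigitJump (sequence : String) : Prop := sequence ≠ ""
instance (sequence : String) : Decidable (Pre_ChefAndDigitJump sequence) := by
  unfold Pre_ChefAndDigitJump; infer_instance
def pvWitness_ChefAndDigitJump : String := "121"

def Spec_ChefAndDigitJump (sequence : String) (out : Int) : Prop := out = ChefAndDigitJump_alt sequence
instance (sequence : String) (out : Int) : Decidable (Spec_ChefAndDigitJump sequence out) := by unfold Spec_ChefAndDigitJump; infer_instance

-- ===== CLAIM (what is proved, stated in full; the proofs are below) =====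
def Claim_equal_ChefAndDigitJump : Prop := ∀ (sequence : String), Dom_ChefAndDigitJump sequence → Pre_ChefAndDigitJump sequence → Spec_ChefAndDigitJump sequence (ChefAndDigitJump sequence)

-- ===== LEMMAS AND PROOFS =====

-- small indexing facts
theorem pv_getD_set_true_self (v : List Bool) (n : Nat) :
    (v.set n true).getD n true = true := by
  rcases Nat.lt_or_ge n v.length with h | h
  · simp [List.getD_eq_getElem?_getD, h]
  · simp [List.getD_eq_getElem?_getD, h]

theorem pv_getD_set_ne {α : Type} (v : List α) (n m : Nat) (a dflt : α) (h : m ≠ n) :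
    (v.set n a).getD m dflt = v.getD m dflt := by
  simp [List.getD_eq_getElem?_getD, List.getElem?_set_ne (Ne.symm h)]

theorem pv_getD_false_lt (v : List Bool) (m : Nat) (h : v.getD m true = false) :
    m < v.length := by
  by_contra hge
  rw [List.getD_eq_getElem?_getD, List.getElem?_eq_none (by omega)] at h
  simp at h

theorem pv_getD_set_self {α : Type} (l : List α) (m : Nat) (a dflt : α)
    (h : m < l.length) : (l.set m a).getD m dflt = a := by
  simp [List.getD_eq_getElem?_getD, h]

theorem pv_getD_irrel {α : Type} (l : List α) (m : Nat) (a b : α)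
    (h : m < l.length) : l.getD m a = l.getD m b := by
  simp [List.getD_eq_getElem?_getD, List.getElem?_eq_getElem h]

theorem pv_count_false_set (v : List Bool) (m : Nat) (h : v.getD m true = false) :
    v.count false = (v.set m true).count false + 1 := by
  induction v generalizing m with
  | nil => simp [List.getD] at h
  | cons b t ih =>
    cases m with
    | zero =>
      simp [List.getD] at h
      subst h
      simp
    | succ m' =>
      have h' : t.getD m' true = false := by simpa [List.getD] using h
      have := ih m' h'
      simp [List.set, List.count_cons]
      omega

theorem pv_toNat_inj {i j : Int} (hi : 0 ≤ i) (hj : 0 ≤ j) (h : i.toNat = j.toNat) :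
    i = j := by omega

-- adjacency relation of the jump graph (character equality or ±1)
def pvAdjP (chars : List Char) (f i : Int) : Prop :=
  chars.getD i.toNat ' ' = chars.getD f.toNat ' ' ∨ i = f - 1 ∨ i = f + 1

-- characterization of A's guarded-visit fold (bucket scan + side moves) over any index list
theorem pv_gfold (n f : Int) (L : List Int) :
    ∀ (qs : List Int) (v : List Bool) (d : List Int),
    v.getD f.toNat true = true →
    v.length = d.length →
    ∃ (DL : List Int) (v' : List Bool) (d' : List Int),
      L.foldl (fun st i => pvSideA n f i st) (qs, v, d) = (qs ++ DL, v', d') ∧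
      (∀ i : Int, i ∈ DL ↔ i ∈ L ∧ (0 ≤ i ∧ i < n) ∧ v.getD i.toNat true = false) ∧
      (∀ m : Nat, (v'.getD m true = true ↔
         v.getD m true = true ∨ ∃ i ∈ DL, i.toNat = m)) ∧
      v'.length = v.length ∧ d'.length = d.length ∧
      (∀ m : Nat, v.getD m true = true → d'.getD m 0 = d.getD m 0) ∧
      (∀ i ∈ DL, d'.getD i.toNat 0 = d.getD f.toNat 0 + 1) ∧
      v'.count false + DL.length = v.count false := by
  induction L with
  | nil =>
    intro qs v d hf hvd
    exact ⟨[], v, d, by simp, by simp, by simp, rfl, rfl, fun _ _ => rfl, by simp, by simp⟩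
  | cons x L ih =>
    intro qs v d hf hvd
    by_cases hinr : 0 ≤ x ∧ x < n
    · by_cases hfresh : v.getD x.toNat true = false
      · -- x is newly visited
        have hxlt : x.toNat < v.length := pv_getD_false_lt v x.toNat hfresh
        have hfx : f.toNat ≠ x.toNat := by
          intro e; rw [e, hfresh] at hf; exact absurd hf (by simp)
        have hstep : pvSideA n f x (qs, v, d) =
            (qs ++ [x], v.set x.toNat true, d.set x.toNat (d.getD f.toNat 0 + 1)) := by
          unfold pvSideA pvVisitA
          rw [if_pos hinr, if_pos hfresh]
        have hf1 : (v.set x.toNat true).getD f.toNat true = true := by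
          rw [pv_getD_set_ne _ _ _ _ _ hfx]; exact hf
        have hvd1 : (v.set x.toNat true).length = (d.set x.toNat (d.getD f.toNat 0 + 1)).length := by
          simp [hvd]
        obtain ⟨DL, v', d', heq, hmem, hvis, hvl, hdl, hdpres, hdval, hcnt⟩ :=
          ih (qs ++ [x]) (v.set x.toNat true) (d.set x.toNat (d.getD f.toNat 0 + 1)) hf1 hvd1
        refine ⟨x :: DL, v', d', ?_, ?_, ?_, ?_, ?_, ?_, ?_, ?_⟩
        · simp only [List.foldl_cons, hstep, heq, List.append_assoc, List.singleton_append]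
        · intro i
          rw [List.mem_cons, hmem i]
          constructor
          · rintro (rfl | ⟨hiL, hiinr, hifresh⟩)
            · exact ⟨List.mem_cons_self, hinr, hfresh⟩
            · refine ⟨List.mem_cons_of_mem _ hiL, hiinr, ?_⟩
              by_cases e : i.toNat = x.toNat
              · have : i = x := pv_toNat_inj hiinr.1 hinr.1 e
                subst this; exact hfresh
              · rwa [pv_getD_set_ne _ _ _ _ _ e] at hifresh
          · rintro ⟨hiL, hiinr, hifresh⟩
            by_cases e : i.toNat = x.toNat
            · exact Or.inl (pv_toNat_inj hiinr.1 hinr.1 e)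
            · rcases List.mem_cons.mp hiL with rfl | hiL'
              · exact Or.inl rfl
              · exact Or.inr ⟨hiL', hiinr, by rwa [pv_getD_set_ne _ _ _ _ _ e]⟩
        · intro m
          rw [hvis m]
          constructor
          · rintro (hv1 | ⟨i, hi, rfl⟩)
            · by_cases e : m = x.toNat
              · subst e; exact Or.inr ⟨x, List.mem_cons_self, rfl⟩
              · rw [pv_getD_set_ne _ _ _ _ _ e] at hv1; exact Or.inl hv1
            · exact Or.inr ⟨i, List.mem_cons_of_mem _ hi, rfl⟩
          · rintro (hv0 | ⟨i, hi, rfl⟩)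
            · exact Or.inl (by
                by_cases e : m = x.toNat
                · subst e; exact pv_getD_set_true_self v x.toNat
                · rw [pv_getD_set_ne _ _ _ _ _ e]; exact hv0)
            · rcases List.mem_cons.mp hi with rfl | hi'
              · exact Or.inl (pv_getD_set_true_self v i.toNat)
              · exact Or.inr ⟨i, hi', rfl⟩
        · simpa using hvl
        · simpa using hdl
        · intro m hm
          have hmx : m ≠ x.toNat := by
            intro e; rw [e, hfresh] at hm; exact absurd hm (by simp)
          have := hdpres m (by rw [pv_getD_set_ne _ _ _ _ _ hmx]; exact hm)
          rw [this, pv_getD_set_ne _ _ _ _ _ hmx]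
        · intro i hi
          rcases List.mem_cons.mp hi with rfl | hi'
          · have hvisited : (v.set i.toNat true).getD i.toNat true = true :=
              pv_getD_set_true_self v i.toNat
            rw [hdpres i.toNat hvisited, pv_getD_set_self _ _ _ _ (by omega)]
          · rw [hdval i hi']
            congr 1
            rw [pv_getD_set_ne _ _ _ _ _ hfx]
        · have h1 := pv_count_false_set v x.toNat hfresh
          simp only [List.length_cons]
          omega
      · -- x in range but already visited: no-op
        have hx : v.getD x.toNat true = true := by
          rcases Bool.eq_false_or_eq_true (v.getD x.toNat true) with h | h
          · exact h
          · exact absurd h hfresh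
        have hstep : pvSideA n f x (qs, v, d) = (qs, v, d) := by
          unfold pvSideA pvVisitA
          rw [if_pos hinr, if_neg (by rw [hx]; simp)]
        obtain ⟨DL, v', d', heq, hmem, hvis, hvl, hdl, hdpres, hdval, hcnt⟩ := ih qs v d hf hvd
        refine ⟨DL, v', d', ?_, ?_, hvis, hvl, hdl, hdpres, hdval, hcnt⟩
        · simp only [List.foldl_cons, hstep, heq]
        · intro i
          rw [hmem i]
          constructor
          · rintro ⟨hiL, hiinr, hifresh⟩
            exact ⟨List.mem_cons_of_mem _ hiL, hiinr, hifresh⟩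
          · rintro ⟨hiL, hiinr, hifresh⟩
            rcases List.mem_cons.mp hiL with rfl | hiL'
            · rw [hx] at hifresh; exact absurd hifresh (by simp)
            · exact ⟨hiL', hiinr, hifresh⟩
    · -- x out of range: no-op
      have hstep : pvSideA n f x (qs, v, d) = (qs, v, d) := by
        unfold pvSideA
        rw [if_neg hinr]
      obtain ⟨DL, v', d', heq, hmem, hvis, hvl, hdl, hdpres, hdval, hcnt⟩ := ih qs v d hf hvd
      refine ⟨DL, v', d', ?_, ?_, hvis, hvl, hdl, hdpres, hdval, hcnt⟩
      · simp only [List.foldl_cons, hstep, heq]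
      · intro i
        rw [hmem i]
        constructor
        · rintro ⟨hiL, hiinr, hifresh⟩
          exact ⟨List.mem_cons_of_mem _ hiL, hiinr, hifresh⟩
        · rintro ⟨hiL, hiinr, hifresh⟩
          rcases List.mem_cons.mp hiL with rfl | hiL'
          · exact absurd hiinr hinr
          · exact ⟨hiL', hiinr, hifresh⟩
-- the adjacency dict A builds: bucket membership characterization
theorem pv_adj_getD (chars : List Char) (c : Char) :
    ((PySem.List.pyRange 0 (chars.length : Int)).foldl
      (fun d i => d.modify (chars.getD i.toNat ' ') [] (· ++ [i])) PySem.Dict.empty).getD c [] =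
    (((PySem.List.pyRange 0 (chars.length : Int)).map
        (fun i => (chars.getD i.toNat ' ', i))).filter (·.1 == c)).map (·.2) := by
  rw [show ((PySem.List.pyRange 0 (chars.length : Int)).foldl
      (fun d i => d.modify (chars.getD i.toNat ' ') [] (· ++ [i])) PySem.Dict.empty) =
    (((PySem.List.pyRange 0 (chars.length : Int)).map
        (fun i => (chars.getD i.toNat ' ', i))).foldl
      (fun d p => d.modify p.1 [] (· ++ [p.2])) PySem.Dict.empty) by rw [List.foldl_map]]
  rw [PySem.Dict.getD_foldl_modify_append]
  simp [PySem.Dict.getD, PySem.Dict.get?, PySem.Dict.empty]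

theorem pv_adj_mem (chars : List Char) (c : Char) (i : Int) :
    i ∈ ((PySem.List.pyRange 0 (chars.length : Int)).foldl
      (fun d i => d.modify (chars.getD i.toNat ' ') [] (· ++ [i])) PySem.Dict.empty).getD c [] ↔
    (0 ≤ i ∧ i < (chars.length : Int)) ∧ chars.getD i.toNat ' ' = c := by
  rw [pv_adj_getD]
  constructor
  · intro h
    obtain ⟨p, hp, hpi⟩ := List.mem_map.mp h
    obtain ⟨hpm, hpc⟩ := List.mem_filter.mp hp
    obtain ⟨j, hj, hjp⟩ := List.mem_map.mp hpm
    have hb := PySem.List.mem_pyRange_one.mp hj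
    subst hpi
    rw [← hjp] at hpc ⊢
    simp only at hpc ⊢
    exact ⟨hb, by simpa using hpc⟩
  · rintro ⟨hinr, hc⟩
    apply List.mem_map.mpr
    refine ⟨(chars.getD i.toNat ' ', i), ?_, rfl⟩
    apply List.mem_filter.mpr
    refine ⟨List.mem_map.mpr ⟨i, PySem.List.mem_pyRange_one.mpr hinr, rfl⟩, by simpa using hc⟩

-- A's loop: processing an entire frontier F (no element of which is the break index)
theorem pv_levelA (chars : List Char) (adj : PySem.Dict Char (List Int)) (n : Int)
    (hB : ∀ (c : Char) (i : Int), i ∈ adj.getD c [] ↔ (0 ≤ i ∧ i < n) ∧ chars.getD i.toNat ' ' = c)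
    (k : Int) (F : List Int) :
    ∀ (fuel : Nat) (acc : List Int) (v : List Bool) (d : List Int),
    (∀ f ∈ F, (0 ≤ f ∧ f < n) ∧ v.getD f.toNat true = true ∧ d.getD f.toNat 0 = k) →
    (∀ f ∈ F, f ≠ n - 1) →
    v.length = chars.length → d.length = chars.length →
    ∃ (D : List Int) (v' : List Bool) (d' : List Int),
      pvLoopA chars adj n (F.length + fuel) (F ++ acc) v d = pvLoopA chars adj n fuel (acc ++ D) v' d' ∧
      (∀ i : Int, i ∈ D ↔ (0 ≤ i ∧ i < n) ∧ v.getD i.toNat true = false ∧ ∃ f ∈ F, pvAdjP chars f i) ∧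
      (∀ m : Nat, (v'.getD m true = true ↔ v.getD m true = true ∨ ∃ i ∈ D, i.toNat = m)) ∧
      v'.length = chars.length ∧ d'.length = chars.length ∧
      (∀ m : Nat, v.getD m true = true → d'.getD m 0 = d.getD m 0) ∧
      (∀ i ∈ D, d'.getD i.toNat 0 = k + 1) ∧
      v'.count false + D.length = v.count false := by
  induction F with
  | nil =>
    intro fuel acc v d _ _ hvl hdl
    exact ⟨[], v, d, by simp, by simp, by simp, hvl, hdl, fun _ _ => rfl, by simp, by simp⟩
  | cons f F ih =>
    intro fuel acc v d hq hne hvl hdl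
    obtain ⟨hfinr, hfv, hfd⟩ := hq f List.mem_cons_self
    have hfne : f ≠ n - 1 := hne f List.mem_cons_self
    -- one unfolding of the loop
    have hlen : (f :: F).length + fuel = (F.length + fuel) + 1 := by
      simp [List.length_cons]; omega
    rw [hlen]
    -- characterize the expansion of front f
    obtain ⟨DL, v1, d1, heq1, hmem1, hvis1, hvl1, hdl1, hdpres1, hdval1, hcnt1⟩ :=
      pv_gfold n f (adj.getD (chars.getD f.toNat ' ') [] ++ [f - 1, f + 1]) (F ++ acc) v d hfv
        (by rw [hvl, hdl])
    have hunfold : pvLoopA chars adj n ((F.length + fuel) + 1) ((f :: F) ++ acc) v d =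
        pvLoopA chars adj n (F.length + fuel) ((F ++ acc) ++ DL) v1 d1 := by
      show (if f = n - 1 then d else _) = _
      rw [if_neg hfne]
      have hbf : (adj.getD (chars.getD f.toNat ' ') []).foldl (pvVisitA f) (F ++ acc, v, d) =
          (adj.getD (chars.getD f.toNat ' ') []).foldl (fun st i => pvSideA n f i st) (F ++ acc, v, d) := by
        apply PySem.List.foldl_congr_mem
        intro st i hi
        have hinr := ((hB _ i).mp hi).1
        unfold pvSideA
        rw [if_pos hinr]
      have hsplit : (adj.getD (chars.getD f.toNat ' ') [] ++ [f - 1, f + 1]).foldl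
            (fun st i => pvSideA n f i st) (F ++ acc, v, d) =
          pvSideA n f (f + 1) (pvSideA n f (f - 1)
            ((adj.getD (chars.getD f.toNat ' ') []).foldl (pvVisitA f) (F ++ acc, v, d))) := by
        rw [List.foldl_append, hbf]
        simp [List.foldl_cons, List.foldl_nil]
      simp only [List.append_eq]
      rw [← hsplit, heq1]
    rw [hunfold]
    have hDLadj : ∀ i : Int, i ∈ DL ↔
        (0 ≤ i ∧ i < n) ∧ v.getD i.toNat true = false ∧ pvAdjP chars f i := by
      intro i
      rw [hmem1 i]
      constructor
      · rintro ⟨hiL, hiinr, hifresh⟩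
        refine ⟨hiinr, hifresh, ?_⟩
        rcases List.mem_append.mp hiL with hib | his
        · exact Or.inl ((hB _ i).mp hib).2
        · simp only [List.mem_cons, List.not_mem_nil, or_false] at his
          rcases his with h | h
          · exact Or.inr (Or.inl h)
          · exact Or.inr (Or.inr h)
      · rintro ⟨hiinr, hifresh, hadj⟩
        refine ⟨?_, hiinr, hifresh⟩
        rcases hadj with h | h | h
        · exact List.mem_append.mpr (Or.inl ((hB _ i).mpr ⟨hiinr, h⟩))
        · exact List.mem_append.mpr (Or.inr (by simp [h]))
        · exact List.mem_append.mpr (Or.inr (by simp [h]))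
    -- recurse on the rest of the frontier
    obtain ⟨D', v', d', heq2, hmem2, hvis2, hvl2, hdl2, hdpres2, hdval2, hcnt2⟩ :=
      ih fuel (acc ++ DL) v1 d1
        (by
          intro g hg
          obtain ⟨hginr, hgv, hgd⟩ := hq g (List.mem_cons_of_mem _ hg)
          exact ⟨hginr, (hvis1 g.toNat).mpr (Or.inl hgv), by rw [hdpres1 g.toNat hgv]; exact hgd⟩)
        (fun g hg => hne g (List.mem_cons_of_mem _ hg))
        (by rw [hvl1, hvl]) (by rw [hdl1, hdl])
    have hDLinr : ∀ i ∈ DL, (0 ≤ i ∧ i < n) := fun i hi => ((hDLadj i).mp hi).1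
    have hDLvis : ∀ i ∈ DL, v1.getD i.toNat true = true := by
      intro i hi
      exact (hvis1 i.toNat).mpr (Or.inr ⟨i, hi, rfl⟩)
    have hDLD : ∀ i : Int, (0 ≤ i ∧ i < n) → ((∃ j ∈ DL, j.toNat = i.toNat) ↔ i ∈ DL) := by
      intro i hinr
      constructor
      · rintro ⟨j, hj, hji⟩
        have := pv_toNat_inj (hDLinr j hj).1 hinr.1 hji
        rwa [← this]
      · intro h; exact ⟨i, h, rfl⟩
    refine ⟨DL ++ D', v', d', ?_, ?_, ?_, hvl2, hdl2, ?_, ?_, ?_⟩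
    · rw [List.append_assoc F acc DL]
      rw [List.append_assoc acc DL D'] at heq2
      exact heq2
    · intro i
      rw [List.mem_append, hDLadj i, hmem2 i]
      constructor
      · rintro (⟨hiinr, hifresh, hadj⟩ | ⟨hiinr, hifresh1, g, hg, hadj⟩)
        · exact ⟨hiinr, hifresh, f, List.mem_cons_self, hadj⟩
        · have hifresh0 : v.getD i.toNat true = false := by
            rcases Bool.eq_false_or_eq_true (v.getD i.toNat true) with h | h
            · rw [(hvis1 i.toNat).mpr (Or.inl h)] at hifresh1
              exact absurd hifresh1 (by simp)
            · exact h
          exact ⟨hiinr, hifresh0, g, List.mem_cons_of_mem _ hg, hadj⟩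
      · rintro ⟨hiinr, hifresh, g, hg, hadj⟩
        rcases List.mem_cons.mp hg with rfl | hg'
        · exact Or.inl ⟨hiinr, hifresh, hadj⟩
        · by_cases hiDL : i ∈ DL
          · exact Or.inl ((hDLadj i).mp hiDL)
          · refine Or.inr ⟨hiinr, ?_, g, hg', hadj⟩
            rcases Bool.eq_false_or_eq_true (v1.getD i.toNat true) with h | h
            · rcases (hvis1 i.toNat).mp h with h0 | hD
              · rw [h0] at hifresh; exact absurd hifresh (by simp)
              · exact absurd ((hDLD i hiinr).mp hD) hiDL
            · exact h
    · intro m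
      rw [hvis2 m]
      constructor
      · rintro (h1 | ⟨i, hi, him⟩)
        · rcases (hvis1 m).mp h1 with h0 | ⟨i, hi, him⟩
          · exact Or.inl h0
          · exact Or.inr ⟨i, List.mem_append.mpr (Or.inl hi), him⟩
        · exact Or.inr ⟨i, List.mem_append.mpr (Or.inr hi), him⟩
      · rintro (h0 | ⟨i, hi, him⟩)
        · exact Or.inl ((hvis1 m).mpr (Or.inl h0))
        · rcases List.mem_append.mp hi with h | h
          · exact Or.inl ((hvis1 m).mpr (Or.inr ⟨i, h, him⟩))
          · exact Or.inr ⟨i, h, him⟩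
    · intro m hm
      rw [hdpres2 m ((hvis1 m).mpr (Or.inl hm)), hdpres1 m hm]
    · intro i hi
      rcases List.mem_append.mp hi with h | h
      · rw [hdpres2 i.toNat (hDLvis i h), hdval1 i h, hfd]
      · exact hdval2 i h
    · rw [List.length_append]
      omega
-- one pop of A's loop (front not the break index), fully characterized
theorem pv_stepA (chars : List Char) (adj : PySem.Dict Char (List Int)) (n : Int)
    (hB : ∀ (c : Char) (i : Int), i ∈ adj.getD c [] ↔ (0 ≤ i ∧ i < n) ∧ chars.getD i.toNat ' ' = c)
    (f : Int) (qs : List Int) (fuel : Nat) (v : List Bool) (d : List Int)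
    (hfne : f ≠ n - 1) (hfv : v.getD f.toNat true = true) (hvd : v.length = d.length) :
    ∃ (DL : List Int) (v1 : List Bool) (d1 : List Int),
      pvLoopA chars adj n (fuel + 1) (f :: qs) v d = pvLoopA chars adj n fuel (qs ++ DL) v1 d1 ∧
      (∀ i : Int, i ∈ DL ↔ (0 ≤ i ∧ i < n) ∧ v.getD i.toNat true = false ∧ pvAdjP chars f i) ∧
      (∀ m : Nat, (v1.getD m true = true ↔ v.getD m true = true ∨ ∃ i ∈ DL, i.toNat = m)) ∧
      v1.length = v.length ∧ d1.length = d.length ∧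
      (∀ m : Nat, v.getD m true = true → d1.getD m 0 = d.getD m 0) ∧
      (∀ i ∈ DL, d1.getD i.toNat 0 = d.getD f.toNat 0 + 1) ∧
      v1.count false + DL.length = v.count false := by
  obtain ⟨DL, v1, d1, heq1, hmem1, hvis1, hvl1, hdl1, hdpres1, hdval1, hcnt1⟩ :=
    pv_gfold n f (adj.getD (chars.getD f.toNat ' ') [] ++ [f - 1, f + 1]) qs v d hfv hvd
  refine ⟨DL, v1, d1, ?_, ?_, hvis1, hvl1, hdl1, hdpres1, hdval1, hcnt1⟩
  · show (if f = n - 1 then d else _) = _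
    rw [if_neg hfne]
    have hbf : (adj.getD (chars.getD f.toNat ' ') []).foldl (pvVisitA f) (qs, v, d) =
        (adj.getD (chars.getD f.toNat ' ') []).foldl (fun st i => pvSideA n f i st) (qs, v, d) := by
      apply PySem.List.foldl_congr_mem
      intro st i hi
      have hinr := ((hB _ i).mp hi).1
      unfold pvSideA
      rw [if_pos hinr]
    have hsplit : (adj.getD (chars.getD f.toNat ' ') [] ++ [f - 1, f + 1]).foldl
          (fun st i => pvSideA n f i st) (qs, v, d) =
        pvSideA n f (f + 1) (pvSideA n f (f - 1)
          ((adj.getD (chars.getD f.toNat ' ') []).foldl (pvVisitA f) (qs, v, d))) := by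
      rw [List.foldl_append, hbf]
      simp [List.foldl_cons, List.foldl_nil]
    simp only [← hsplit]
    rw [heq1]
  · intro i
    rw [hmem1 i]
    constructor
    · rintro ⟨hiL, hiinr, hifresh⟩
      refine ⟨hiinr, hifresh, ?_⟩
      rcases List.mem_append.mp hiL with hib | his
      · exact Or.inl ((hB _ i).mp hib).2
      · simp only [List.mem_cons, List.not_mem_nil, or_false] at his
        rcases his with h | h
        · exact Or.inr (Or.inl h)
        · exact Or.inr (Or.inr h)
    · rintro ⟨hiinr, hifresh, hadj⟩
      refine ⟨?_, hiinr, hifresh⟩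
      rcases hadj with h | h | h
      · exact List.mem_append.mpr (Or.inl ((hB _ i).mpr ⟨hiinr, h⟩))
      · exact List.mem_append.mpr (Or.inr (by simp [h]))
      · exact List.mem_append.mpr (Or.inr (by simp [h]))

-- A's loop when the break index is already in the queue: it returns the current
-- distance array's last-cell value unchanged
theorem pv_breakA (chars : List Char) (adj : PySem.Dict Char (List Int)) (n : Int)
    (hB : ∀ (c : Char) (i : Int), i ∈ adj.getD c [] ↔ (0 ≤ i ∧ i < n) ∧ chars.getD i.toNat ' ' = c) :
    ∀ (fuel : Nat) (q : List Int) (v : List Bool) (d : List Int),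
    (n - 1) ∈ q →
    (∀ f ∈ q, (0 ≤ f ∧ f < n) ∧ v.getD f.toNat true = true) →
    v.getD (n - 1).toNat true = true →
    v.length = chars.length → d.length = chars.length →
    q.length + v.count false + 1 ≤ fuel →
    ∃ d', pvLoopA chars adj n fuel q v d = d' ∧
      d'.getD (n - 1).toNat 0 = d.getD (n - 1).toNat 0 ∧ d'.length = chars.length := by
  intro fuel
  induction fuel with
  | zero => intro q v d _ _ _ _ _ hf; omega
  | succ fuel ih =>
    intro q v d hmem hq hvlast hvl hdl hfuel
    cases q with
    | nil => exact absurd hmem (List.not_mem_nil)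
    | cons f qs =>
      by_cases hf : f = n - 1
      · refine ⟨d, ?_, rfl, hdl⟩
        show (if f = n - 1 then d else _) = d
        rw [if_pos hf]
      · have hmem' : (n - 1) ∈ qs := by
          rcases List.mem_cons.mp hmem with h | h
          · exact absurd h.symm hf
          · exact h
        obtain ⟨hfinr, hfv⟩ := hq f List.mem_cons_self
        obtain ⟨DL, v1, d1, heq, hDL, hvis, hvl1, hdl1, hdpres, hdval, hcnt⟩ :=
          pv_stepA chars adj n hB f qs fuel v d hf hfv (by rw [hvl, hdl])
        rw [heq]
        obtain ⟨d', hd'eq, hd'last, hd'len⟩ := ih (qs ++ DL) v1 d1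
          (List.mem_append.mpr (Or.inl hmem'))
          (by
            intro g hg
            rcases List.mem_append.mp hg with h | h
            · obtain ⟨hginr, hgv⟩ := hq g (List.mem_cons_of_mem _ h)
              exact ⟨hginr, (hvis g.toNat).mpr (Or.inl hgv)⟩
            · exact ⟨((hDL g).mp h).1, (hvis g.toNat).mpr (Or.inr ⟨g, h, rfl⟩)⟩)
          ((hvis (n - 1).toNat).mpr (Or.inl hvlast))
          (by rw [hvl1, hvl]) (by rw [hdl1, hdl])
          (by simp only [List.length_cons] at hfuel; simp only [List.length_append]; omega)
        exact ⟨d', hd'eq, by rw [hd'last, hdpres (n - 1).toNat hvlast], hd'len⟩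

-- membership in B's per-round comprehension
theorem pv_newlyB_mem (chars : List Char) (n : Int) (reached : List Bool)
    (cs : PySem.Set Char) (i : Int) :
    i ∈ pvNewlyB chars n reached cs ↔ (0 ≤ i ∧ i < n) ∧
      reached.getD i.toNat true = false ∧
      ((0 < i ∧ reached.getD (i - 1).toNat false = true) ∨
       (i + 1 < n ∧ reached.getD (i + 1).toNat false = true) ∨
       cs.contains (chars.getD i.toNat ' ') = true) := by
  unfold pvNewlyB
  rw [List.mem_filter, PySem.List.mem_pyRange_one]
  simp only [Bool.and_eq_true, Bool.or_eq_true, decide_eq_true_eq, beq_iff_eq]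
  tauto

-- marking a list of in-range indices reached, pointwise
theorem pv_foldSet (L : List Int) : ∀ (r : List Bool),
    (∀ i ∈ L, 0 ≤ i ∧ i < (r.length : Int)) →
    (L.foldl (fun r i => r.set i.toNat true) r).length = r.length ∧
    (∀ m : Nat, ((L.foldl (fun r i => r.set i.toNat true) r).getD m true = true ↔
      r.getD m true = true ∨ ∃ i ∈ L, i.toNat = m)) := by
  induction L with
  | nil => intro r _; exact ⟨rfl, by simp⟩
  | cons x L ih =>
    intro r hinr
    have hx := hinr x List.mem_cons_self
    obtain ⟨hlen, hpt⟩ := ih (r.set x.toNat true)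
      (by intro i hi; simpa using hinr i (List.mem_cons_of_mem _ hi))
    refine ⟨by simpa using hlen, ?_⟩
    intro m
    simp only [List.foldl_cons]
    rw [hpt m]
    constructor
    · rintro (h1 | ⟨i, hi, him⟩)
      · by_cases e : m = x.toNat
        · exact Or.inr ⟨x, List.mem_cons_self, e.symm⟩
        · rw [pv_getD_set_ne _ _ _ _ _ e] at h1; exact Or.inl h1
      · exact Or.inr ⟨i, List.mem_cons_of_mem _ hi, him⟩
    · rintro (h0 | ⟨i, hi, him⟩)
      · left
        by_cases e : m = x.toNat
        · subst e; exact pv_getD_set_true_self r x.toNat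
        · rw [pv_getD_set_ne _ _ _ _ _ e]; exact h0
      · rcases List.mem_cons.mp hi with rfl | hi'
        · exact Or.inl (him ▸ pv_getD_set_true_self r i.toNat)
        · exact Or.inr ⟨i, hi', him⟩

-- adding the characters of a list of indices to the reached-character set
theorem pv_foldAdd (chars : List Char) (L : List Int) : ∀ (cs : PySem.Set Char) (c : Char),
    ((L.foldl (fun s i => s.add (chars.getD i.toNat ' ')) cs).contains c = true ↔
      cs.contains c = true ∨ ∃ i ∈ L, chars.getD i.toNat ' ' = c) := by
  induction L with
  | nil => intro cs c; simp
  | cons x L ih =>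
    intro cs c
    simp only [List.foldl_cons]
    rw [ih]
    simp only [PySem.Set.contains_iff, PySem.Set.mem_add, List.mem_cons]
    constructor
    · rintro ((h | h) | ⟨i, hi, him⟩)
      · exact Or.inl h
      · exact Or.inr ⟨x, Or.inl rfl, h.symm⟩
      · exact Or.inr ⟨i, Or.inr hi, him⟩
    · rintro (h | ⟨i, rfl | hi', him⟩)
      · exact Or.inl (Or.inl h)
      · exact Or.inl (Or.inr him.symm)
      · exact Or.inr ⟨i, hi', him⟩
theorem pv_bool_ext {a b : Bool} (h : a = true ↔ b = true) : a = b := by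
  cases a <;> cases b <;> simp_all

theorem pv_last_cell (l : List Int) (hl : l ≠ []) :
    PySem.List.pyGetD l (-1) 0 = l.getD (l.length - 1) 0 := by
  rw [PySem.List.pyGetD_neg_one l 0 hl, List.getLast_eq_getElem]
  have hlen : l.length - 1 < l.length := by
    cases l
    · simp at hl
    · simp
  rw [List.getD_eq_getElem?_getD, List.getElem?_eq_getElem hlen]
  rfl

-- the lock-step simulation: A's queue BFS against B's level sweep, one level per round
theorem pv_mainSim (chars : List Char) (adj : PySem.Dict Char (List Int)) (n : Int)
    (hn : n = (chars.length : Int)) (hn1 : 1 ≤ n)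
    (hB : ∀ (c : Char) (i : Int), i ∈ adj.getD c [] ↔ (0 ≤ i ∧ i < n) ∧ chars.getD i.toNat ' ' = c) :
    ∀ (fB : Nat) (fA : Nat) (q : List Int) (v : List Bool) (d : List Int)
      (reached : List Bool) (cs : PySem.Set Char) (k : Int),
    (∀ f ∈ q, (0 ≤ f ∧ f < n) ∧ v.getD f.toNat true = true ∧ d.getD f.toNat 0 = k) →
    (∀ j, (0 ≤ j ∧ j < n) → v.getD j.toNat true = true → j ∉ q →
       ∀ i, (0 ≤ i ∧ i < n) → pvAdjP chars j i → v.getD i.toNat true = true) →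
    (∀ c, cs.contains c = true ↔
       ∃ j, (0 ≤ j ∧ j < n) ∧ v.getD j.toNat true = true ∧ chars.getD j.toNat ' ' = c) →
    (v.getD (n - 1).toNat true = true → (n - 1) ∈ q) →
    (∀ m : Nat, v.getD m true = reached.getD m true) →
    v.getD 0 true = true →
    v.length = chars.length → d.length = chars.length → reached.length = chars.length →
    q.length + v.count false + 1 ≤ fA →
    v.count false + 1 ≤ fB →
    PySem.List.pyGetD (pvLoopA chars adj n fA q v d) (-1) 0 = pvLoopB chars n fB reached cs k := by
  intro fB
  induction fB with
  | zero => intro fA q v d reached cs k _ _ _ _ _ _ _ _ _ _ hfB; omega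
  | succ fB ih =>
    intro fA q v d reached cs k hq hclos hcs hlast hvr h0 hvl hdl hrl hfA hfB
    have hconv : ∀ m : Nat, m < chars.length → reached.getD m false = v.getD m true := by
      intro m hm
      rw [pv_getD_irrel reached m false true (by rw [hrl]; exact hm), ← hvr m]
    by_cases hvlast : v.getD (n - 1).toNat true = true
    · -- the break index is already visited: both sides stop, with value k
      have hmemq := hlast hvlast
      have hBret : pvLoopB chars n (fB + 1) reached cs k = k := by
        show (if reached.getD (n - 1).toNat true = true then k else _) = k
        rw [if_pos (by rw [← hvr]; exact hvlast)]
      obtain ⟨d', hd'eq, hd'last, hd'len⟩ := pv_breakA chars adj n hB fA q v d hmemq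
        (fun f hf => ⟨(hq f hf).1, (hq f hf).2.1⟩) hvlast hvl hdl hfA
      rw [hd'eq, hBret]
      have hd'ne : d' ≠ [] := by
        intro h
        rw [h] at hd'len
        simp at hd'len
        omega
      rw [pv_last_cell d' hd'ne, hd'len]
      have htn : chars.length - 1 = (n - 1).toNat := by omega
      rw [htn, hd'last]
      exact (hq (n - 1) hmemq).2.2
    · -- process one whole level on both sides
      have hvlastf : v.getD (n - 1).toNat true = false := by
        cases h : v.getD (n - 1).toNat true
        · rfl
        · exact absurd h hvlast
      have hn2 : 2 ≤ n := by
        by_contra h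
        have : (n - 1).toNat = 0 := by omega
        rw [this, h0] at hvlastf
        exact absurd hvlastf (by simp)
      obtain ⟨fuelA', hfa⟩ : ∃ fuelA', fA = q.length + fuelA' := ⟨fA - q.length, by omega⟩
      obtain ⟨D, v', d', heqA, hDmem, hvis, hvl', hdl', hdpres, hdval, hcnt⟩ :=
        pv_levelA chars adj n hB k q fuelA' [] v d hq
          (by
            intro f hf he
            rw [he] at hf
            exact hvlast ((hq _ hf).2.1))
          hvl hdl
      have hDinr : ∀ i ∈ D, (0 ≤ i ∧ i < n) := fun i hi => ((hDmem i).mp hi).1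
      have hup : ∀ (j i : Int), (0 ≤ j ∧ j < n) → (0 ≤ i ∧ i < n) →
          v.getD j.toNat true = true → v.getD i.toNat true = false →
          pvAdjP chars j i → i ∈ D := by
        intro j i hjinr hiinr hjv hif hadj
        by_cases hjq : j ∈ q
        · exact (hDmem i).mpr ⟨hiinr, hif, j, hjq, hadj⟩
        · have := hclos j hjinr hjv hjq i hiinr hadj
          rw [this] at hif
          exact absurd hif (by simp)
      have hDnew : ∀ i : Int, i ∈ D ↔ i ∈ pvNewlyB chars n reached cs := by
        intro i
        rw [hDmem i, pv_newlyB_mem]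
        constructor
        · rintro ⟨hiinr, hif, f, hfq, hadj⟩
          obtain ⟨hfinr, hfv, _⟩ := hq f hfq
          refine ⟨hiinr, by rw [← hvr]; exact hif, ?_⟩
          rcases hadj with h | h | h
          · exact Or.inr (Or.inr ((hcs _).mpr ⟨f, hfinr, hfv, h.symm⟩))
          · refine Or.inr (Or.inl ⟨by omega, ?_⟩)
            have ht : (i + 1).toNat = f.toNat := by omega
            rw [ht, hconv f.toNat (by omega)]
            exact hfv
          · refine Or.inl ⟨by omega, ?_⟩
            have ht : (i - 1).toNat = f.toNat := by omega
            rw [ht, hconv f.toNat (by omega)]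
            exact hfv
        · rintro ⟨hiinr, hir, hcond⟩
          have hif : v.getD i.toNat true = false := by rw [hvr]; exact hir
          rcases hcond with ⟨hpos, hr⟩ | ⟨hlt, hr⟩ | hc
          · refine (hDmem i).mp (hup (i - 1) i ⟨by omega, by omega⟩ hiinr ?_ hif (Or.inr (Or.inr (by omega))))
            rw [← hconv (i - 1).toNat (by omega)]
            exact hr
          · refine (hDmem i).mp (hup (i + 1) i ⟨by omega, by omega⟩ hiinr ?_ hif (Or.inr (Or.inl (by omega))))
            rw [← hconv (i + 1).toNat (by omega)]
            exact hr
          · obtain ⟨j, hjinr, hjv, hjc⟩ := (hcs _).mp hc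
            exact (hDmem i).mp (hup j i hjinr hiinr hjv hif (Or.inl hjc.symm))
      have hnewinr : ∀ i ∈ pvNewlyB chars n reached cs,
          0 ≤ i ∧ i < (reached.length : Int) := by
        intro i hi
        have := hDinr i ((hDnew i).mpr hi)
        rw [hrl, ← hn]
        exact this
      obtain ⟨hrlen', hrpt⟩ := pv_foldSet (pvNewlyB chars n reached cs) reached hnewinr
      -- D is nonempty: the least unvisited index has a visited left neighbour
      have hDne : D ≠ [] := by
        have hex : ∃ m : Nat, m < chars.length ∧ v.getD m true = false :=
          ⟨(n - 1).toNat, by omega, hvlastf⟩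
        have hspec := Nat.find_spec hex
        have hj1 : 1 ≤ Nat.find hex := by
          rcases Nat.eq_zero_or_pos (Nat.find hex) with h | h
          · rw [h] at hspec
            rw [h0] at hspec
            exact absurd hspec.2 (by simp)
          · exact h
        have hprev : v.getD (Nat.find hex - 1) true = true := by
          have hnot := Nat.find_min hex (m := Nat.find hex - 1) (by omega)
          cases h : v.getD (Nat.find hex - 1) true
          · exact absurd ⟨by omega, h⟩ hnot
          · rfl
        have hmemN : ((Nat.find hex : Int)) ∈ pvNewlyB chars n reached cs := by
          rw [pv_newlyB_mem]
          refine ⟨⟨by omega, by omega⟩, ?_, Or.inl ⟨by omega, ?_⟩⟩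
          · rw [show ((Nat.find hex : Int)).toNat = Nat.find hex by omega, ← hvr]
            exact hspec.2
          · rw [show ((Nat.find hex : Int) - 1).toNat = Nat.find hex - 1 by omega]
            rw [hconv (Nat.find hex - 1) (by omega)]
            exact hprev
        exact List.ne_nil_of_mem ((hDnew _).mpr hmemN)
      have hDlen : 1 ≤ D.length := List.length_pos_iff.mpr hDne
      -- B takes one round
      have hBstep : pvLoopB chars n (fB + 1) reached cs k =
          pvLoopB chars n fB
            ((pvNewlyB chars n reached cs).foldl (fun r i => r.set i.toNat true) reached)
            ((pvNewlyB chars n reached cs).foldl (fun s i => s.add (chars.getD i.toNat ' ')) cs)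
            (k + 1) := by
        show (if reached.getD (n - 1).toNat true = true then k else _) = _
        rw [if_neg (by rw [← hvr]; exact hvlast)]
      have heqA' : pvLoopA chars adj n fA q v d = pvLoopA chars adj n fuelA' D v' d' := by
        rw [hfa]
        simpa using heqA
      rw [heqA', hBstep]
      apply ih fuelA' D v' d' _ _ (k + 1)
      · intro g hg
        exact ⟨hDinr g hg, (hvis g.toNat).mpr (Or.inr ⟨g, hg, rfl⟩), hdval g hg⟩
      · intro j hjinr hjv' hjq i hiinr hadj
        rcases (hvis j.toNat).mp hjv' with hjv | ⟨i0, hi0, htn⟩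
        · by_cases hjq0 : j ∈ q
          · by_cases hiv : v.getD i.toNat true = true
            · exact (hvis _).mpr (Or.inl hiv)
            · have hif : v.getD i.toNat true = false := by
                cases h : v.getD i.toNat true
                · rfl
                · exact absurd h hiv
              exact (hvis _).mpr (Or.inr ⟨i, (hDmem i).mpr ⟨hiinr, hif, j, hjq0, hadj⟩, rfl⟩)
          · exact (hvis _).mpr (Or.inl (hclos j hjinr hjv hjq0 i hiinr hadj))
        · have he : i0 = j := pv_toNat_inj (hDinr i0 hi0).1 hjinr.1 htn
          rw [he] at hi0
          exact absurd hi0 hjq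
      · intro c
        rw [pv_foldAdd]
        constructor
        · rintro (h | ⟨i, hi, hic⟩)
          · obtain ⟨j, hjinr, hjv, hjc⟩ := (hcs c).mp h
            exact ⟨j, hjinr, (hvis _).mpr (Or.inl hjv), hjc⟩
          · have hiD := (hDnew i).mpr hi
            exact ⟨i, hDinr i hiD, (hvis _).mpr (Or.inr ⟨i, hiD, rfl⟩), hic⟩
        · rintro ⟨j, hjinr, hjv', hjc⟩
          rcases (hvis j.toNat).mp hjv' with h | ⟨i0, hi0, htn⟩
          · exact Or.inl ((hcs c).mpr ⟨j, hjinr, h, hjc⟩)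
          · have he : i0 = j := pv_toNat_inj (hDinr i0 hi0).1 hjinr.1 htn
            subst he
            exact Or.inr ⟨i0, (hDnew i0).mp hi0, hjc⟩
      · intro h
        rcases (hvis _).mp h with h0' | ⟨i0, hi0, htn⟩
        · rw [h0'] at hvlastf
          exact absurd hvlastf (by simp)
        · have he : i0 = n - 1 := pv_toNat_inj (hDinr i0 hi0).1 (by omega) htn
          rw [← he]
          exact hi0
      · intro m
        apply pv_bool_ext
        rw [hvis m, hrpt m, hvr m]
        apply or_congr Iff.rfl
        constructor
        · rintro ⟨i, hi, him⟩
          exact ⟨i, (hDnew i).mp hi, him⟩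
        · rintro ⟨i, hi, him⟩
          exact ⟨i, (hDnew i).mpr hi, him⟩
      · exact (hvis 0).mpr (Or.inl h0)
      · exact hvl'
      · exact hdl'
      · rw [hrlen', hrl]
      · omega
      · omega
theorem pv_getD_replicate (N m : Nat) :
    (List.replicate N false).getD m true = if m < N then false else true := by
  by_cases h : m < N
  · simp [List.getD_eq_getElem?_getD, h]
  · rw [List.getD_eq_getElem?_getD, List.getElem?_eq_none (by simpa using h)]
    simp [h]

theorem pv_count_init (N : Nat) (h : 1 ≤ N) :
    ((List.replicate N false).set 0 true).count false = N - 1 := by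
  obtain ⟨M, rfl⟩ : ∃ M, N = M + 1 := ⟨N - 1, by omega⟩
  simp [List.replicate_succ]

-- ===== VERDICT (by name: the statement is the Claim_ definition above) =====
theorem ChefAndDigitJump_spec : Claim_equal_ChefAndDigitJump := by
  intro sequence _ hpre
  unfold Spec_ChefAndDigitJump
  simp only [ChefAndDigitJump, ChefAndDigitJump_alt]
  have hne : sequence.toList ≠ [] := by
    intro h
    exact hpre (String.toList_inj.mp (by rw [h]; rfl))
  have hN : 1 ≤ sequence.toList.length := List.length_pos_iff.mpr hne
  have hv00 : ((List.replicate sequence.toList.length false).set 0 true).getD 0 true = true :=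
    pv_getD_set_true_self _ 0
  have hv0pos : ∀ m : Nat, m ≠ 0 → m < sequence.toList.length →
      ((List.replicate sequence.toList.length false).set 0 true).getD m true = false := by
    intro m hm hmlt
    rw [pv_getD_set_ne _ _ _ _ _ hm, pv_getD_replicate, if_pos hmlt]
  apply pv_mainSim sequence.toList _ (sequence.toList.length : Int) rfl (by exact_mod_cast hN)
    (fun c i => pv_adj_mem sequence.toList c i)
  · -- hq
    intro f hf
    have : f = 0 := by simpa using hf
    subst this
    refine ⟨⟨le_refl 0, by exact_mod_cast hN⟩, hv00, ?_⟩
    show (List.replicate sequence.toList.length (0 : Int)).getD 0 0 = 0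
    rw [List.getD_eq_getElem?_getD, List.getElem?_replicate]
    split <;> rfl
  · -- hclos
    intro j hjinr hjv hjq i _ _
    have hj0 : j ≠ 0 := by simpa using hjq
    have : j.toNat ≠ 0 := by omega
    rw [hv0pos j.toNat this (by omega)] at hjv
    exact absurd hjv (by simp)
  · -- hcs
    intro c
    rw [PySem.Set.contains_iff, PySem.Set.mem_ofList]
    simp only [List.mem_singleton]
    constructor
    · rintro rfl
      exact ⟨0, ⟨le_refl 0, by exact_mod_cast hN⟩, hv00, rfl⟩
    · rintro ⟨j, hjinr, hjv, hjc⟩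
      by_cases hj0 : j.toNat = 0
      · rw [← hjc, hj0]
      · rw [hv0pos j.toNat hj0 (by omega)] at hjv
        exact absurd hjv (by simp)
  · -- hlast
    intro h
    by_cases h1 : sequence.toList.length = 1
    · simp [h1]
    · have : ((sequence.toList.length : Int) - 1).toNat ≠ 0 := by omega
      rw [hv0pos _ this (by omega)] at h
      exact absurd h (by simp)
  · -- hvr: identical initial arrays
    intro m
    rfl
  · exact hv00
  · simp
  · simp
  · simp
  · -- fuel for A
    rw [pv_count_init _ hN]
    simp only [List.length_singleton]
    omega
  · -- fuel for B
    rw [pv_count_init _ hN]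
    omega
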